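-- pv_equiv track=rewrite | github.com/wuzhenhe/UCS-SQL | clean.py | find_last_two_occurrences
-- ===== SOURCE A (Python) =====
-- def find_last_two_occurrences(text, substring):
--     positions = []
--     start = 0
--     while True:
--         position = text.find(substring, start)
--         if position == -1:
--             break
--         positions.append(position)
--         start = position + 1
--     if len(positions) >= 2:
--         return positions[-2:]
--     else:
--         return []
-- ===== SOURCE B (Python) =====
-- def find_last_two_occurrences(text, substring):
--     last = text.rfind(substring)
--     if last == -1:
--         return []
--     end = last + len(substring) - 1
--     if end < 0:
--         return []  # no room for an earlier occurrence
--     second = text.rfind(substring, 0, end)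
--     if second == -1:
--         return []
--     return [second, last]
-- ===== Notes on version B (the rewrite author's own statement) =====
-- stated objective: simpler
-- what changed: Replaces the forward scan that collects every occurrence position in a list with two targeted backward searches: rfind for the last occurrence, then rfind bounded by last+len(substring)-1 for the occurrence before it; no position list is kept.
import Mathlib
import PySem

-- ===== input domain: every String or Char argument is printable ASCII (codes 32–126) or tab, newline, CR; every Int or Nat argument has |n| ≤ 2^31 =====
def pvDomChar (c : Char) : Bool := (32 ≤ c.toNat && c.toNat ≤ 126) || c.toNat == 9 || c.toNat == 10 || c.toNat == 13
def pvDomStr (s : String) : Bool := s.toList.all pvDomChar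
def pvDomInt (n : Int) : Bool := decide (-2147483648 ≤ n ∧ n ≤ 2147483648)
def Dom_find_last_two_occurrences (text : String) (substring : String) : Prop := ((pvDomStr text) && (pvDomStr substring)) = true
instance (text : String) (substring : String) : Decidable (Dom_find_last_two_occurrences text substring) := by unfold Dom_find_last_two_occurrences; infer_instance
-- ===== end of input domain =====

-- B replaces A's forward collect-all-positions loop by two backward searches (rfind);
-- equivalence of the RETURN value is proved on all inputs (A is total).

-- ===== PORT A =====
-- the while loop: position = text.find(substring, start); break on -1; append position; start = position + 1
-- (the fuel argument only makes the recursion total; text.length + 2 iterations always suffice)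
def findLTOLoop (text substring : String) : Nat → Int → List Int → List Int
  | 0, _, positions => positions
  | fuel+1, start, positions =>
    let position := PySem.Str.findFrom text substring start
    if position = -1 then positions
    else findLTOLoop text substring fuel (position + 1) (positions ++ [position])


def find_last_two_occurrences (text : String) (substring : String) : List Int :=
  let positions := findLTOLoop text substring (text.length + 2) 0 []
  if 2 ≤ positions.length then PySem.List.slice positions (some (-2)) none
  else []

-- ===== PORT B =====
def find_last_two_occurrences_alt (text : String) (substring : String) : List Int :=
  let last := PySem.Str.rfind text substring
  if last = -1 then []
  else
    let endIdx := last + (PySem.Str.len substring : Int) - 1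
    if endIdx < 0 then []
    else
      let second := PySem.Str.rfindFrom text substring 0 (some endIdx)
      if second = -1 then [] else [second, last]

-- ===== PRECONDITION & SPEC =====
def Spec_find_last_two_occurrences (text : String) (substring : String) (out : List Int) : Prop := out = find_last_two_occurrences_alt text substring
instance (text : String) (substring : String) (out : List Int) : Decidable (Spec_find_last_two_occurrences text substring out) := by unfold Spec_find_last_two_occurrences; infer_instance

-- ===== CLAIM (what is proved, stated in full; the proofs are below) =====
def Claim_equal_find_last_two_occurrences : Prop := ∀ (text : String) (substring : String), Dom_find_last_two_occurrences text substring → Spec_find_last_two_occurrences text substring (find_last_two_occurrences text substring)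

-- ===== LEMMAS AND PROOFS =====

-- the ascending list of all occurrence positions of sub in s from index start on (positions i ≤ s.length with sub a prefix of s.drop i)
def occsFrom (s sub : List Char) (start : ℕ) : List ℕ :=
  if start ≤ s.length then
    (if sub.isPrefixOf (s.drop start) then [start] else []) ++ occsFrom s sub (start+1)
  else []
termination_by s.length + 1 - start

lemma mem_occsFrom (s sub : List Char) (start i : ℕ) :
    i ∈ occsFrom s sub start ↔ start ≤ i ∧ i ≤ s.length ∧ sub <+: s.drop i := by
  fun_induction occsFrom s sub start with
  | case1 start h ih =>
    simp only [List.mem_append, ih]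
    split <;> rename_i hp <;> simp only [List.mem_singleton, List.not_mem_nil] <;>
      constructor
    · rintro (rfl | ⟨h1,h2,h3⟩)
      · exact ⟨le_refl _, h, List.isPrefixOf_iff_prefix.mp hp⟩
      · exact ⟨by omega, h2, h3⟩
    · rintro ⟨h1,h2,h3⟩
      rcases eq_or_lt_of_le h1 with rfl | hlt
      · exact Or.inl rfl
      · exact Or.inr ⟨by omega, h2, h3⟩
    · rintro (h | ⟨h1,h2,h3⟩)
      · simp at h
      · exact ⟨by omega, h2, h3⟩
    · rintro ⟨h1,h2,h3⟩
      rcases eq_or_lt_of_le h1 with rfl | hlt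
      · exact absurd (List.isPrefixOf_iff_prefix.mpr h3) (by simpa using hp)
      · exact Or.inr ⟨by omega, h2, h3⟩
  | case2 start h => simp; omega

lemma go_succ (s sub : List Char) (j : ℕ) : PySem.Chars.rfind.go s sub (j+1) =
    if sub.isPrefixOf (s.drop (j+1)) then ((j:ℤ)+1) else PySem.Chars.rfind.go s sub j := by
  simp [PySem.Chars.rfind.go]

lemma go_eq_neg_one (s sub : List Char) (j : ℕ)
    (h : ∀ i ≤ j, ¬ sub <+: s.drop i) : PySem.Chars.rfind.go s sub j = -1 := by
  induction j with
  | zero =>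
    show (if sub.isPrefixOf s then (0:ℤ) else -1) = -1
    rw [if_neg]; simpa [List.isPrefixOf_iff_prefix] using h 0 le_rfl
  | succ j ih =>
    rw [go_succ, if_neg]
    · exact ih fun i hi => h i (by omega)
    · simpa [List.isPrefixOf_iff_prefix] using h (j+1) le_rfl

lemma go_eq_max (s sub : List Char) (j m : ℕ) (hm : m ≤ j) (hp : sub <+: s.drop m)
    (hmax : ∀ i, m < i → i ≤ j → ¬ sub <+: s.drop i) :
    PySem.Chars.rfind.go s sub j = (m:ℤ) := by
  induction j with
  | zero =>
    interval_cases m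
    show (if sub.isPrefixOf s then (0:ℤ) else -1) = 0
    rw [if_pos]; simpa [List.isPrefixOf_iff_prefix] using hp
  | succ j ih =>
    rw [go_succ]
    rcases Nat.eq_or_lt_of_le hm with rfl | hlt
    · rw [if_pos (by simpa [List.isPrefixOf_iff_prefix] using hp)]; push_cast; ring
    · rw [if_neg (by simpa [List.isPrefixOf_iff_prefix] using hmax (j+1) hlt le_rfl)]
      exact ih (by omega) fun i h1 h2 => hmax i h1 (by omega)

lemma occsFrom_pairwise (s sub : List Char) (start : ℕ) :
    (occsFrom s sub start).Pairwise (· < ·) := by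
  fun_induction occsFrom s sub start with
  | case1 start h ih =>
    refine List.pairwise_append.mpr ⟨?_, ih, ?_⟩
    · split <;> simp
    · intro x hx y hy
      have := (mem_occsFrom s sub (start+1) y).mp hy
      split at hx <;> simp at hx
      omega
  | case2 start h => simp

lemma occsFrom_eq_cons (s sub : List Char) (start m : ℕ) (h1 : start ≤ m) (h2 : m ≤ s.length)
    (hp : sub <+: s.drop m) (hmin : ∀ i, start ≤ i → i < m → ¬ sub <+: s.drop i) :
    occsFrom s sub start = m :: occsFrom s sub (m+1) := by
  have key : ∀ d start, m - start = d → start ≤ m →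
      (∀ i, start ≤ i → i < m → ¬ sub <+: s.drop i) →
      occsFrom s sub start = m :: occsFrom s sub (m+1) := by
    intro d
    induction d with
    | zero =>
      intro start hd _ _
      have : start = m := by omega
      subst this
      rw [occsFrom, if_pos (by omega), if_pos (List.isPrefixOf_iff_prefix.mpr hp)]
      rfl
    | succ d ih =>
      intro start hd hle hmin
      rw [occsFrom, if_pos (by omega),
        if_neg (by simpa [List.isPrefixOf_iff_prefix] using hmin start le_rfl (by omega))]
      simpa using ih (start+1) (by omega) (by omega) fun i hi => hmin i (by omega)
  exact key (m - start) start rfl h1 hmin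

lemma findFrom_past (s sub : List Char) (k : ℕ) (h : s.length < k) :
    PySem.Chars.findFrom s sub (k:ℤ) none = -1 := by
  simp only [PySem.Chars.findFrom]
  split_ifs <;> omega

lemma rfindFrom_eval (s sub : List Char) (e : ℤ) (h0 : 0 ≤ e) (h1 : e ≤ s.length) :
    PySem.Chars.rfindFrom s sub 0 (some e) = PySem.Chars.rfind (s.take e.toNat) sub := by
  simp only [PySem.Chars.rfindFrom]
  split_ifs <;> first | omega | (rename_i hh; omega) | simp_all


lemma loop_eq (text substring : String) : ∀ (fuel start : ℕ) (acc : List Int),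
    text.length + 2 ≤ fuel + start →
    findLTOLoop text substring fuel (start : ℤ) acc
      = acc ++ (occsFrom text.toList substring.toList start).map (fun i => (i : ℤ)) := by
  intro fuel
  induction fuel with
  | zero =>
    intro start acc hf
    have hlen0 : text.length = text.toList.length := rfl
    rw [occsFrom, if_neg (by omega)]
    simp [findLTOLoop]
  | succ fuel ih =>
    intro start acc hf
    set s := text.toList with hs
    set sub := substring.toList with hsub
    have hlen : text.length = s.length := rfl
    simp only [findLTOLoop, PySem.Str.findFrom_eq, ← hs, ← hsub]
    by_cases hk : s.length < start
    · rw [findFrom_past s sub start hk, if_pos rfl, occsFrom, if_neg (by omega)]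
      simp
    · push Not at hk
      rw [PySem.Chars.findFrom_natCast s sub start hk]
      by_cases hq : PySem.Chars.find (s.drop start) sub = -1
      · rw [if_pos (by rw [hq]; rfl)]
        have hnocc : ∀ i, start ≤ i → ¬ sub <+: s.drop i := by
          intro i hi hpre
          have : sub <+: (s.drop start).drop (i - start) := by
            rw [List.drop_drop]
            have heq : start + (i - start) = i := by omega
            rwa [heq]
          have : PySem.Chars.isIn sub (s.drop start) = true :=
            (PySem.Chars.exists_prefix_drop_iff_isIn sub (s.drop start)).mp ⟨i - start, this⟩
          rw [PySem.Chars.isIn_iff_infix] at this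
          exact (PySem.Chars.find_eq_neg_one_iff _ _).mp hq this
        have : occsFrom s sub start = [] := by
          rw [List.eq_nil_iff_forall_not_mem]
          intro i hi
          obtain ⟨h1, h2, h3⟩ := (mem_occsFrom s sub start i).mp hi
          exact hnocc i h1 h3
        simp [this]
      · have hge : 0 ≤ PySem.Chars.find (s.drop start) sub := by
          have := PySem.Chars.neg_one_le_find (s.drop start) sub
          omega
        obtain ⟨hpre, hmin⟩ := PySem.Chars.find_spec hge
        set q := (PySem.Chars.find (s.drop start) sub).toNat with hqdef
        have hcast : PySem.Chars.find (s.drop start) sub = (q:ℤ) := by omega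
        have hql : q ≤ s.length - start := by
          have := PySem.Chars.find_le_length (s.drop start) sub
          simp [List.length_drop] at this
          omega
        have hm2 : start + q ≤ s.length := by omega
        have hmpre : sub <+: s.drop (start + q) := by
          rwa [List.drop_drop] at hpre
        have hmmin : ∀ i, start ≤ i → i < start + q → ¬ sub <+: s.drop i := by
          intro i h1 h2 hpre'
          refine hmin (i - start) (by omega) ?_
          rw [List.drop_drop]
          have heq : start + (i - start) = i := by omega
          rwa [heq]
        rw [if_neg (by rw [hcast]; omega)]
        rw [if_neg hq]
        rw [occsFrom_eq_cons s sub start (start + q) (by omega) hm2 hmpre hmmin]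
        have : ((start:ℤ) + PySem.Chars.find (s.drop start) sub) + 1 = ((start + q + 1 : ℕ) : ℤ) := by
          rw [hcast]; push_cast; ring
        rw [this, ih (start + q + 1) (acc ++ [(start:ℤ) + PySem.Chars.find (s.drop start) sub]) (by omega)]
        rw [hcast]
        simp

lemma slice_neg_two {α : Type} (l : List α) (h : 2 ≤ l.length) :
    PySem.List.slice l (some (-2)) none = l.drop (l.length - 2) := by
  simp only [PySem.List.slice, PySem.List.clampIdx]
  rw [if_pos (by omega), if_neg (by omega)]
  have h1 : ((l.length : ℤ) + (-2)).toNat = l.length - 2 := by omega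
  rw [h1]
  exact List.take_of_length_le (by simp)
-- equivalence of the RETURN value is proved on all inputs (A is total).

-- ===== PORT A =====
-- the while loop: position = text.find(substring, start); break on -1; append; start = position+1
-- (fuel only makes the recursion total; text.length+2 iterations always suffice)

lemma find_last_two_occurrences_eq_alt : ∀ (text substring : String),
    find_last_two_occurrences text substring = find_last_two_occurrences_alt text substring := by
  intro text substring
  set s := text.toList with hs
  set sub := substring.toList with hsub
  have hlen : text.length = s.length := rfl
  have hsublen : PySem.Str.len substring = (sub.length : ℤ) := by
    simp only [PySem.Str.len_eq, hsub]
  set L := occsFrom s sub 0 with hLdef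
  have hmem : ∀ i, i ∈ L ↔ i ≤ s.length ∧ sub <+: s.drop i := by
    intro i
    rw [hLdef, mem_occsFrom]
    exact ⟨fun ⟨_, h2, h3⟩ => ⟨h2, h3⟩, fun ⟨h2, h3⟩ => ⟨Nat.zero_le i, h2, h3⟩⟩
  have hpw : L.Pairwise (· < ·) := occsFrom_pairwise s sub 0
  have hA : find_last_two_occurrences text substring =
      (if 2 ≤ (L.map (fun i => (i:ℤ))).length
       then PySem.List.slice (L.map (fun i => (i:ℤ))) (some (-2)) none else []) := by
    unfold find_last_two_occurrences
    rw [show (0:ℤ) = ((0:ℕ):ℤ) from rfl,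
      loop_eq text substring (text.length + 2) 0 [] (by omega), List.nil_append]
  rw [hA]
  unfold find_last_two_occurrences_alt
  simp only [PySem.Str.rfind_eq, PySem.Str.rfindFrom_eq, ← hs, ← hsub, hsublen]
  have hrfind : PySem.Chars.rfind s sub = PySem.Chars.rfind.go s sub s.length := rfl
  rcases hLrev : L.reverse with _ | ⟨a, rest⟩
  · -- no occurrence at all
    have hLnil : L = [] := by simpa using congrArg List.reverse hLrev
    have hneg : PySem.Chars.rfind.go s sub s.length = -1 := by
      apply go_eq_neg_one
      intro i hi hp
      have : i ∈ L := (hmem i).mpr ⟨hi, hp⟩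
      simp [hLnil] at this
    rw [hrfind, hneg]
    simp [hLnil]
  · rcases rest with _ | ⟨b, t⟩
    · -- exactly one occurrence a
      have hLone : L = [a] := by simpa using congrArg List.reverse hLrev
      obtain ⟨halen, hapre⟩ := (hmem a).mp (by simp [hLone])
      have hmax : ∀ i, i ≤ s.length → sub <+: s.drop i → i = a := by
        intro i h1 h2
        have : i ∈ L := (hmem i).mpr ⟨h1, h2⟩
        simpa [hLone] using this
      have hlast : PySem.Chars.rfind.go s sub s.length = (a:ℤ) :=
        go_eq_max s sub s.length a halen hapre
          (fun i h1 h2 hp => by have := hmax i h2 hp; omega)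
      rw [hrfind, hlast]
      have hsubla : sub.length ≤ s.length - a := by
        have := hapre.length_le
        simpa [List.length_drop] using this
      by_cases hE : ((a:ℤ) + (sub.length:ℤ) - 1) < 0
      · rw [if_neg (show ¬((a:ℤ) = -1) by omega), if_pos hE]
        simp [hLone]
      · rw [if_neg (show ¬((a:ℤ) = -1) by omega), if_neg hE]
        have hE0 : (0:ℤ) ≤ (a:ℤ) + (sub.length:ℤ) - 1 := by omega
        have hE1 : (a:ℤ) + (sub.length:ℤ) - 1 ≤ ((s.length:ℕ):ℤ) := by omega
        rw [rfindFrom_eval s sub _ hE0 hE1]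
        set E := ((a:ℤ) + (sub.length:ℤ) - 1).toNat with hEdef
        have hEa : E + 1 = a + sub.length := by omega
        have hElen : E ≤ s.length := by omega
        have htake : (s.take E).length = E := by simp; omega
        have hrneg : PySem.Chars.rfind (s.take E) sub = -1 := by
          rw [show PySem.Chars.rfind (s.take E) sub
              = PySem.Chars.rfind.go (s.take E) sub (s.take E).length from rfl, htake]
          apply go_eq_neg_one
          intro i hi hp
          rw [List.drop_take] at hp
          obtain ⟨hp1, hp2⟩ := List.prefix_take_iff.mp hp
          have : i = a := hmax i (by omega) hp1
          omega
        rw [hrneg]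
        simp [hLone]
    · -- at least two occurrences: L.reverse = a :: b :: t
      have hLeq : L = t.reverse ++ [b, a] := by
        have := congrArg List.reverse hLrev
        simpa using this
      have hpwr : (a :: b :: t).Pairwise (· > ·) := by
        rw [← hLrev]
        exact List.pairwise_reverse.mpr (by simpa using hpw)
      have hba : b < a := (List.pairwise_cons.mp hpwr).1 b (by simp)
      have hta : ∀ x ∈ b :: t, x < a := (List.pairwise_cons.mp hpwr).1
      have htb : ∀ x ∈ t, x < b :=
        (List.pairwise_cons.mp (List.pairwise_cons.mp hpwr).2).1
      have hamem : a ∈ L := by rw [← List.mem_reverse, hLrev]; simp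
      have hbmem : b ∈ L := by rw [← List.mem_reverse, hLrev]; simp
      obtain ⟨halen, hapre⟩ := (hmem a).mp hamem
      obtain ⟨hblen, hbpre⟩ := (hmem b).mp hbmem
      have hmax : ∀ i, i ≤ s.length → sub <+: s.drop i → i ≤ a := by
        intro i h1 h2
        have hin : i ∈ L := (hmem i).mpr ⟨h1, h2⟩
        rw [← List.mem_reverse, hLrev] at hin
        simp only [List.mem_cons] at hin
        rcases hin with rfl | rfl | h
        · omega
        · omega
        · exact le_of_lt (hta _ (List.mem_cons_of_mem b h))
      have hlast : PySem.Chars.rfind.go s sub s.length = (a:ℤ) :=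
        go_eq_max s sub s.length a halen hapre
          (fun i h1 h2 hp => by have := hmax i h2 hp; omega)
      rw [hrfind, hlast]
      have hsubla : sub.length ≤ s.length - a := by
        have := hapre.length_le
        simpa [List.length_drop] using this
      rw [if_neg (show ¬((a:ℤ) = -1) by omega),
        if_neg (show ¬((a:ℤ) + (sub.length:ℤ) - 1 < 0) by omega)]
      have hE0 : (0:ℤ) ≤ (a:ℤ) + (sub.length:ℤ) - 1 := by omega
      have hE1 : (a:ℤ) + (sub.length:ℤ) - 1 ≤ ((s.length:ℕ):ℤ) := by omega
      rw [rfindFrom_eval s sub _ hE0 hE1]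
      set E := ((a:ℤ) + (sub.length:ℤ) - 1).toNat with hEdef
      have hEa : E + 1 = a + sub.length := by omega
      have hElen : E ≤ s.length := by omega
      have htake : (s.take E).length = E := by simp; omega
      have hsecond : PySem.Chars.rfind (s.take E) sub = (b:ℤ) := by
        rw [show PySem.Chars.rfind (s.take E) sub
            = PySem.Chars.rfind.go (s.take E) sub (s.take E).length from rfl, htake]
        apply go_eq_max (s.take E) sub E b (by omega)
        · rw [List.drop_take]
          exact List.prefix_take_iff.mpr ⟨hbpre, by omega⟩
        · intro i h1 h2 hp
          rw [List.drop_take] at hp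
          obtain ⟨hp1, hp2⟩ := List.prefix_take_iff.mp hp
          have hin : i ∈ L := (hmem i).mpr ⟨by omega, hp1⟩
          rw [← List.mem_reverse, hLrev] at hin
          simp only [List.mem_cons] at hin
          rcases hin with rfl | rfl | h
          · omega
          · omega
          · have := htb i h
            omega
      rw [hsecond, if_neg (show ¬((b:ℤ) = -1) by omega)]
      have hlen2 : 2 ≤ (L.map (fun i => (i:ℤ))).length := by
        rw [hLeq]; simp
      rw [if_pos hlen2, slice_neg_two _ hlen2, hLeq]
      simp


-- ===== VERDICT (by name: the statement is the Claim_ definition above) =====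
theorem find_last_two_occurrences_spec : Claim_equal_find_last_two_occurrences := by
  intro text substring _
  exact find_last_two_occurrences_eq_alt text substring
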